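-- pv_equiv track=rewrite | github.com/robertelee78/hf2q | scripts/bench_mlx_lm.py | generate_synthetic_prompt
-- ===== SOURCE A (Python) =====
-- def generate_synthetic_prompt(target_tokens: int) -> str:
--     """Generate a deterministic synthetic prompt.
--
--     Uses the same word vocabulary as the hf2q benchmark harness for
--     fair comparison. Each word is roughly 1 token for subword tokenizers.
--     """
--     words = [
--         "the", "quick", "brown", "fox", "jumps", "over", "the", "lazy",
--         "dog", "and", "then", "runs", "through", "the", "forest", "where",
--         "many", "trees", "grow", "tall", "under", "the", "bright", "sun",
--         "that", "shines", "down", "upon", "the", "green", "meadow", "below",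
--     ]
--     word_count = target_tokens + target_tokens // 10
--     prompt_words = [words[i % len(words)] for i in range(word_count)]
--     return " ".join(prompt_words)
-- ===== SOURCE B (Python) =====
-- def generate_synthetic_prompt(target_tokens: int) -> str:
--     """Generate a deterministic synthetic prompt.
--
--     Block-replication variant: instead of indexing the vocabulary with a
--     per-index modulo for every word, replicate the whole vocabulary
--     word_count // len(words) times and append the words[:remainder] slice.
--     """
--     words = [
--         "the", "quick", "brown", "fox", "jumps", "over", "the", "lazy",
--         "dog", "and", "then", "runs", "through", "the", "forest", "where",
--         "many", "trees", "grow", "tall", "under", "the", "bright", "sun",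
--         "that", "shines", "down", "upon", "the", "green", "meadow", "below",
--     ]
--     word_count = max(target_tokens + target_tokens // 10, 0)
--     q, r = divmod(word_count, len(words))
--     return " ".join(words * q + words[:r])
-- ===== Notes on version B (the rewrite author's own statement) =====
-- stated objective: faster
-- what changed: Replaces the per-index modulo list comprehension with whole-block list replication (words * q) plus a remainder slice computed by one divmod, after clamping the word count at a minimum of zero.
import Mathlib
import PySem

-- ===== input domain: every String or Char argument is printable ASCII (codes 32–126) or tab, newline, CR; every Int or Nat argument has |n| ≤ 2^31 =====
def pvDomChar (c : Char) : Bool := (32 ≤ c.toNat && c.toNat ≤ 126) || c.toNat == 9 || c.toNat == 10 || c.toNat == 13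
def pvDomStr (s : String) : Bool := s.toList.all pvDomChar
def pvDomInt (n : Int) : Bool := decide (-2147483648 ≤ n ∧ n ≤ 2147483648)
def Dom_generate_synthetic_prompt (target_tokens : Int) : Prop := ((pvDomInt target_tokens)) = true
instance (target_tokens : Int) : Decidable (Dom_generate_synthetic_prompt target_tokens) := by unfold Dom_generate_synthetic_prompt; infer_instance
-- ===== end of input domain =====

-- B replaces A's per-index modulo loop with whole-block replication plus a remainder slice (objective: faster, constant-factor).

-- the shared word vocabulary literal (identical in Source A and Source B)
def pvWords : List String := [
  "the", "quick", "brown", "fox", "jumps", "over", "the", "lazy",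
  "dog", "and", "then", "runs", "through", "the", "forest", "where",
  "many", "trees", "grow", "tall", "under", "the", "bright", "sun",
  "that", "shines", "down", "upon", "the", "green", "meadow", "below"]

-- ===== PORT A =====
-- words[i % len(words)] never raises (i ≥ 0, divisor 32 > 0), so the pyGetD default "" is never used.
def generate_synthetic_prompt (target_tokens : Int) : String :=
  let word_count : Int := target_tokens + PySem.Int.floordiv target_tokens 10
  let prompt_words : List String :=
    (PySem.List.pyRange 0 word_count 1).map
      (fun i => PySem.List.pyGetD pvWords (PySem.Int.mod i (PySem.List.len pvWords)) "")
  PySem.Str.join " " prompt_words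

-- ===== PORT B =====
def generate_synthetic_prompt_alt (target_tokens : Int) : String :=
  let word_count : Int := max (target_tokens + PySem.Int.floordiv target_tokens 10) 0
  let q : Int := PySem.Int.floordiv word_count (PySem.List.len pvWords)
  let r : Int := PySem.Int.mod word_count (PySem.List.len pvWords)
  PySem.Str.join " " (PySem.List.pyRepeat pvWords q ++ PySem.List.slice pvWords none (some r))

-- ===== PRECONDITION & SPEC =====
def Spec_generate_synthetic_prompt (target_tokens : Int) (out : String) : Prop := out = generate_synthetic_prompt_alt target_tokens
instance (target_tokens : Int) (out : String) : Decidable (Spec_generate_synthetic_prompt target_tokens out) := by unfold Spec_generate_synthetic_prompt; infer_instance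

-- ===== CLAIM (what is proved, stated in full; the proofs are below) =====
def Claim_equal_generate_synthetic_prompt : Prop := ∀ (target_tokens : Int), Dom_generate_synthetic_prompt target_tokens → Spec_generate_synthetic_prompt target_tokens (generate_synthetic_prompt target_tokens)

-- ===== LEMMAS AND PROOFS =====

theorem pvWords_length : pvWords.length = 32 := by decide

theorem flatten_replicate_comm {α : Type} (q : Nat) (xs : List α) :
    xs ++ (List.replicate q xs).flatten = (List.replicate q xs).flatten ++ xs := by
  induction q with
  | zero => simp
  | succ k ih =>
    rw [List.replicate_succ, List.flatten_cons, ih, ← List.append_assoc, ih]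

theorem flatten_replicate_succ {α : Type} (q : Nat) (xs : List α) :
    (List.replicate (q + 1) xs).flatten = (List.replicate q xs).flatten ++ xs := by
  rw [List.replicate_succ, List.flatten_cons, flatten_replicate_comm]

-- the comprehension [words[i % 32] for i in range(n)] is q full copies of words plus the first r words
theorem pvKey (n : Nat) :
    (List.range n).map (fun (k : Nat) => PySem.List.pyGetD pvWords (PySem.Int.mod (k : Int) ((32 : Nat) : Int)) "")
      = (List.replicate (n / 32) pvWords).flatten ++ pvWords.take (n % 32) := by
  induction n with
  | zero => simp
  | succ m ih =>
    rw [List.range_succ, List.map_append, ih, List.map_singleton, PySem.Int.mod_natCast]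
    have hlt : m % 32 < 32 := Nat.mod_lt _ (by omega)
    have hget : PySem.List.pyGetD pvWords ((m % 32 : Nat) : Int) "" = pvWords[m % 32]'(by rw [pvWords_length]; exact hlt) := by
      rw [PySem.List.pyGetD_natCast]
      exact List.getD_eq_getElem _ _ (by rw [pvWords_length]; exact hlt)
    rw [hget]
    by_cases h31 : m % 32 = 31
    · have hdiv : (m + 1) / 32 = m / 32 + 1 := by omega
      have hmod : (m + 1) % 32 = 0 := by omega
      rw [hdiv, hmod, flatten_replicate_succ, List.take_zero, List.append_nil, List.append_assoc]
      congr 1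
      have : pvWords.take (m % 32) ++ [pvWords[m % 32]'(by rw [pvWords_length]; exact hlt)]
          = pvWords.take (m % 32 + 1) := List.take_concat_get' pvWords _ _
      rw [this, h31]
      decide
    · have hdiv : (m + 1) / 32 = m / 32 := by omega
      have hmod : (m + 1) % 32 = m % 32 + 1 := by omega
      rw [hdiv, hmod, List.append_assoc]
      congr 1
      exact List.take_concat_get' pvWords _ _

-- ===== VERDICT (by name: the statement is the Claim_ definition above) =====
theorem generate_synthetic_prompt_spec : Claim_equal_generate_synthetic_prompt := by
  intro t _
  unfold Spec_generate_synthetic_prompt generate_synthetic_prompt generate_synthetic_prompt_alt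
  simp only []
  set wc : Int := t + PySem.Int.floordiv t 10 with hwc
  by_cases hpos : 0 ≤ wc
  · -- word_count ≥ 0: both sides are q copies of words plus the first r words
    obtain ⟨n, hn⟩ : ∃ n : Nat, wc = (n : Int) := ⟨wc.toNat, (Int.toNat_of_nonneg hpos).symm⟩
    rw [hn]
    have hmax : max ((n : Int)) 0 = (n : Int) := by omega
    rw [hmax]
    congr 1
    have hlen : PySem.List.len pvWords = (32 : Int) := by decide
    rw [hlen, show (32 : Int) = ((32 : Nat) : Int) from by norm_num,
        PySem.Int.floordiv_natCast n 32, PySem.Int.mod_natCast n 32,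
        PySem.List.slice_to_natCast, PySem.List.pyRange_zero_nat, List.map_map]
    have : ((fun i => PySem.List.pyGetD pvWords (PySem.Int.mod i ((32 : Nat) : Int)) "") ∘ fun k : Nat => (k : Int))
        = fun (k : Nat) => PySem.List.pyGetD pvWords (PySem.Int.mod ((k : Nat) : Int) ((32 : Nat) : Int)) "" := rfl
    rw [this, pvKey]
    simp only [PySem.List.pyRepeat]
    congr 2 <;> omega
  · have hneg : wc < 0 := by omega
    -- word_count < 0: empty range on the left, zero repetitions and empty slice on the right
    rw [PySem.List.pyRange_one_eq_nil (by omega : wc ≤ 0)]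
    have hmax : max wc 0 = 0 := by omega
    rw [hmax]
    have h1 : PySem.Int.floordiv 0 (PySem.List.len pvWords) = 0 := by decide
    have h2 : PySem.Int.mod 0 (PySem.List.len pvWords) = 0 := by decide
    rw [h1, h2, show (0 : Int) = ((0 : Nat) : Int) from by norm_num,
        PySem.List.slice_to_natCast]
    simp [PySem.List.pyRepeat]
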